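-- pv_equiv track=rewrite | github.com/arpie-steele/symbolic-mgu | pmproofs_history/extract_subproofs.py | is_valid_subproof
-- ===== SOURCE A (Python) =====
-- def is_valid_subproof(substring):
--     """
--     Check if a substring is a valid condensed detachment proof.
--
--     A valid proof:
--     - Starts with stack depth 0
--     - Ends with stack depth 1
--     - Never goes negative
--
--     Proof notation (read right-to-left in reverse):
--     - '1', '2', '3': push axiom (stack +1)
--     - 'D': modus ponens (stack -1, pops 2 and pushes 1)
--     """
--     stack_depth = 0
--
--     # Process in reverse (right to left)
--     for char in reversed(substring):
--         if char in '123':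
--             stack_depth += 1
--         elif char == 'D':
--             if stack_depth < 2:
--                 return False  # Not enough items for modus ponens
--             stack_depth -= 1  # Pop 2, push 1 = net -1
--         else:
--             return False  # Invalid character
--
--     return stack_depth == 1
-- ===== SOURCE B (Python) =====
-- def is_valid_subproof(substring):
--     """Forward scan: track how many terms are still needed (prefix notation)."""
--     needed = 1
--     for char in substring:
--         if char not in '123D':
--             return False
--         if needed == 0:
--             return False  # extra trailing symbol
--         needed += 1 if char == 'D' else -1
--     return needed == 0
-- ===== Notes on version B (the rewrite author's own statement) =====
-- stated objective: alternative
-- what changed: Replaces A's right-to-left postfix stack-depth simulation with a left-to-right prefix scan that tracks the number of terms still needed (needed=1; 'D' adds one, a digit satisfies one), returning True iff needed ends at 0 and never hits 0 early.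
import Mathlib
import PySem

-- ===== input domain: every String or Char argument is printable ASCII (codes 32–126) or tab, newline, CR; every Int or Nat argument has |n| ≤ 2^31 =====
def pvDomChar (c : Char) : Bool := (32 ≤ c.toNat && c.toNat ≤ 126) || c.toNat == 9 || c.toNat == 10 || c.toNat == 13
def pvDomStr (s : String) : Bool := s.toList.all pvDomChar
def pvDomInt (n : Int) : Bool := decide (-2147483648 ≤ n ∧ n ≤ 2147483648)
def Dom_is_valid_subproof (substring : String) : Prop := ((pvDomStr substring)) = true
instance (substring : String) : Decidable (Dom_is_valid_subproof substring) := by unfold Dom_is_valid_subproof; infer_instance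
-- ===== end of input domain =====

-- B replaces A's right-to-left postfix stack-depth simulation by a left-to-right
-- prefix scan counting the terms still needed (objective: alternative decomposition).

-- ===== PORT A =====
-- A's loop over reversed(substring): digits push, 'D' needs depth ≥ 2 and pops one net.
def goA : List Char → Int → Bool
  | [], depth => depth == 1
  | c :: rest, depth =>
    if c = '1' ∨ c = '2' ∨ c = '3' then goA rest (depth + 1)
    else if c = 'D' then
      if depth < 2 then false else goA rest (depth - 1)
    else false

def is_valid_subproof (substring : String) : Bool :=
  goA substring.toList.reverse 0

-- ===== PORT B =====
-- B's forward loop: `needed` terms still required; invalid char or needed = 0 mid-string fails.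
def goB : List Char → Int → Bool
  | [], needed => needed == 0
  | c :: rest, needed =>
    if ¬ (c = '1' ∨ c = '2' ∨ c = '3' ∨ c = 'D') then false
    else if needed = 0 then false
    else goB rest (needed + (if c = 'D' then 1 else -1))

def is_valid_subproof_alt (substring : String) : Bool :=
  goB substring.toList 1

-- ===== PRECONDITION & SPEC =====
def Spec_is_valid_subproof (substring : String) (out : Bool) : Prop := out = is_valid_subproof_alt substring
instance (substring : String) (out : Bool) : Decidable (Spec_is_valid_subproof substring out) := by unfold Spec_is_valid_subproof; infer_instance

-- ===== CLAIM (what is proved, stated in full; the proofs are below) =====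
def Claim_equal_is_valid_subproof : Prop := ∀ (substring : String), Dom_is_valid_subproof substring → Spec_is_valid_subproof substring (is_valid_subproof substring)

-- ===== LEMMAS AND PROOFS =====

-- weight of a char: 'D' demands one more term, a digit supplies one
def wt (c : Char) : Int := if c = 'D' then 1 else -1

def cnt (l : List Char) : Int := (l.map wt).sum

def okc (c : Char) : Prop := c = '1' ∨ c = '2' ∨ c = '3' ∨ c = 'D'

theorem cnt_nil : cnt [] = 0 := rfl

theorem cnt_cons (c : Char) (l : List Char) : cnt (c :: l) = wt c + cnt l := by
  simp [cnt]

theorem cnt_append (p s : List Char) : cnt (p ++ s) = cnt p + cnt s := by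
  simp [cnt]

theorem cnt_reverse (l : List Char) : cnt l.reverse = cnt l := by
  unfold cnt
  rw [List.map_reverse, List.sum_reverse]

-- characterization of A's reverse stack scan
theorem goA_char (l : List Char) (d : Int) (hd : 0 ≤ d) :
    goA l d = true ↔
      (∀ c ∈ l, okc c) ∧ d - cnt l = 1 ∧ ∀ i < l.length, 1 ≤ d - cnt (l.take (i + 1)) := by
  induction l generalizing d with
  | nil =>
    simp only [goA, List.not_mem_nil, false_implies, implies_true, true_and, List.length_nil,
      Nat.not_lt_zero, and_true, beq_iff_eq, cnt, List.map_nil, List.sum_nil]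
    omega
  | cons c rest ih =>
    simp only [goA]
    by_cases h1 : c = '1' ∨ c = '2' ∨ c = '3'
    · rw [if_pos h1, ih (d + 1) (by omega)]
      have hw : wt c = -1 := by
        rcases h1 with h | h | h <;> simp [wt, h]
      constructor
      · rintro ⟨hok, htot, hpre⟩
        refine ⟨fun x hx => (List.mem_cons.mp hx).elim (fun h => h ▸ Or.imp id (Or.imp id Or.inl) h1) (hok x),
          by rw [cnt_cons, hw]; omega, ?_⟩
        intro i hi
        cases i with
        | zero => simp only [List.take_succ_cons, List.take_zero, cnt_cons, cnt_nil]; rw [hw]; omega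
        | succ j =>
          have := hpre j (by simpa using hi)
          simp only [List.take_succ_cons, cnt_cons, hw]
          omega
      · rintro ⟨hok, htot, hpre⟩
        refine ⟨fun x hx => hok x (List.mem_cons_of_mem _ hx),
          by rw [cnt_cons, hw] at htot; omega, ?_⟩
        intro i hi
        have := hpre (i + 1) (by simpa using Nat.succ_lt_succ hi)
        simp only [List.take_succ_cons, cnt_cons, hw] at this
        omega
    · rw [if_neg h1]
      by_cases h2 : c = 'D'
      · rw [if_pos h2]
        have hw : wt c = 1 := by simp [wt, h2]
        by_cases hlt : d < 2
        · rw [if_pos hlt]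
          constructor
          · intro h; exact absurd h (by simp)
          · rintro ⟨_, _, hpre⟩
            have := hpre 0 (by simp)
            simp only [List.take_succ_cons, List.take_zero, cnt_cons, cnt_nil] at this
            rw [hw] at this
            omega
        · rw [if_neg hlt, ih (d - 1) (by omega)]
          constructor
          · rintro ⟨hok, htot, hpre⟩
            refine ⟨fun x hx => (List.mem_cons.mp hx).elim (fun h => h ▸ Or.inr (Or.inr (Or.inr h2))) (hok x),
              by rw [cnt_cons, hw]; omega, ?_⟩
            intro i hi
            cases i with
            | zero => simp only [List.take_succ_cons, List.take_zero, cnt_cons, cnt_nil]; rw [hw]; omega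
            | succ j =>
              have := hpre j (by simpa using hi)
              simp only [List.take_succ_cons, cnt_cons, hw]
              omega
          · rintro ⟨hok, htot, hpre⟩
            refine ⟨fun x hx => hok x (List.mem_cons_of_mem _ hx),
              by rw [cnt_cons, hw] at htot; omega, ?_⟩
            intro i hi
            have := hpre (i + 1) (by simpa using Nat.succ_lt_succ hi)
            simp only [List.take_succ_cons, cnt_cons, hw] at this
            omega
      · rw [if_neg h2]
        constructor
        · intro h; exact absurd h (by simp)
        · rintro ⟨hok, _, _⟩
          have := hok c (List.mem_cons_self ..)
          unfold okc at this
          tauto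

-- characterization of B's forward needed-counter scan
theorem goB_char (l : List Char) (n : Int) (hn : 0 ≤ n) :
    goB l n = true ↔
      (∀ c ∈ l, okc c) ∧ n + cnt l = 0 ∧ ∀ i < l.length, 1 ≤ n + cnt (l.take i) := by
  induction l generalizing n with
  | nil =>
    simp only [goB, List.not_mem_nil, false_implies, implies_true, true_and, List.length_nil,
      Nat.not_lt_zero, and_true, beq_iff_eq, cnt, List.map_nil, List.sum_nil]
    omega
  | cons c rest ih =>
    simp only [goB]
    by_cases hok : okc c
    · rw [if_neg (by unfold okc at hok; tauto)]
      have hw : (if c = 'D' then (1 : Int) else -1) = wt c := rfl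
      by_cases hz : n = 0
      · rw [if_pos hz]
        constructor
        · intro h; exact absurd h (by simp)
        · rintro ⟨_, _, hpre⟩
          have := hpre 0 (by simp)
          simp only [List.take_zero, cnt_nil] at this
          omega
      · rw [if_neg hz, hw, ih (n + wt c) (by unfold wt; split <;> omega)]
        constructor
        · rintro ⟨hok2, htot, hpre⟩
          refine ⟨fun x hx => (List.mem_cons.mp hx).elim (fun h => h ▸ hok) (hok2 x),
            by rw [cnt_cons]; omega, ?_⟩
          intro i hi
          cases i with
          | zero => simp only [List.take_zero, cnt_nil]; omega
          | succ j =>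
            have := hpre j (by simpa using hi)
            simp only [List.take_succ_cons, cnt_cons]
            omega
        · rintro ⟨hok2, htot, hpre⟩
          refine ⟨fun x hx => hok2 x (List.mem_cons_of_mem _ hx),
            by rw [cnt_cons] at htot; omega, ?_⟩
          intro i hi
          have := hpre (i + 1) (by simpa using Nat.succ_lt_succ hi)
          simp only [List.take_succ_cons, cnt_cons] at this
          omega
    · rw [if_pos (by unfold okc at hok; tauto)]
      constructor
      · intro h; exact absurd h (by simp)
      · rintro ⟨hok2, _, _⟩
        exact absurd (hok2 c (List.mem_cons_self ..)) hok

-- the two characterizations coincide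
theorem goA_eq_goB (l : List Char) : goA l.reverse 0 = goB l 1 := by
  rw [Bool.eq_iff_iff, goA_char _ 0 le_rfl, goB_char _ 1 (by omega)]
  constructor
  · rintro ⟨hok, htot, hpre⟩
    rw [cnt_reverse] at htot
    refine ⟨fun c hc => hok c (by simpa using hc), by omega, ?_⟩
    intro i hi
    -- proper prefix of l ↔ nonempty prefix of l.reverse (the matching suffix)
    have hj : l.length - 1 - i < l.reverse.length := by simp; omega
    have := hpre (l.length - 1 - i) hj
    have htk : cnt (l.reverse.take (l.length - 1 - i + 1)) = cnt (l.drop i) := by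
      rw [List.take_reverse, cnt_reverse]
      congr 2
      omega
    rw [htk] at this
    have hsplit : cnt (l.take i) + cnt (l.drop i) = cnt l := by
      rw [← cnt_append, List.take_append_drop]
    omega
  · rintro ⟨hok, htot, hpre⟩
    refine ⟨fun c hc => hok c (by simpa using hc), by rw [cnt_reverse]; omega, ?_⟩
    intro i hi
    simp only [List.length_reverse] at hi
    have := hpre (l.length - 1 - i) (by omega)
    have htk : cnt (l.reverse.take (i + 1)) = cnt (l.drop (l.length - 1 - i)) := by
      rw [List.take_reverse, cnt_reverse]
      congr 2
      omega
    have hsplit : cnt (l.take (l.length - 1 - i)) + cnt (l.drop (l.length - 1 - i)) = cnt l := by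
      rw [← cnt_append, List.take_append_drop]
    rw [htk]
    omega

-- ===== VERDICT (by name: the statement is the Claim_ definition above) =====
theorem is_valid_subproof_spec : Claim_equal_is_valid_subproof := by
  intro s _
  show is_valid_subproof s = is_valid_subproof_alt s
  exact goA_eq_goB s.toList
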